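-- pv_equiv track=rewrite | github.com/weiyangzen/awesome_algorithms | Algorithms/数学-代数拓扑-0250-van_Kampen定理算法/demo.py | power_word
-- ===== SOURCE A (Python) =====
-- from typing import Dict, List, Sequence, Tuple
--
-- Letter = Tuple[str, int]
--
-- Word = Tuple[Letter, ...]
--
-- def reduce_word(raw_letters: Sequence[Letter]) -> Word:
--     """在自由群语境下做相邻同生成元指数合并与约化。"""
--     stack: List[Letter] = []
--     for gen, exp in raw_letters:
--         if exp == 0:
--             continue
--         if stack and stack[-1][0] == gen:
--             merged = stack[-1][1] + exp
--             if merged == 0: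
--                 stack.pop()
--             else:
--                 stack[-1] = (gen, merged)
--         else:
--             stack.append((gen, exp))
--     return tuple(stack)
--
-- def identity_word() -> Word:
--     return tuple()
--
-- def multiply_words(*words: Word) -> Word:
--     merged: List[Letter] = []
--     for w in words:
--         merged.extend(w)
--     return reduce_word(merged)
--
-- def inverse_word(word: Word) -> Word:
--     return reduce_word(tuple((g, -e) for g, e in reversed(word)))
--
-- def power_word(word: Word, k: int) -> Word:
--     if k == 0:
--         return identity_word()
--     if k < 0:
--         return power_word(inverse_word(word), -k)
--     out = identity_word()
--     for _ in range(k):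
--         out = multiply_words(out, word)
--     return out
-- ===== SOURCE B (Python) =====
-- def power_word(word, k):
--     # One reduction stack maintained across all k copies: each letter is pushed
--     # once, instead of re-reducing the whole accumulated product every multiply.
--     def push(s, g, e):
--         if e == 0:
--             return
--         if s and s[-1][0] == g:
--             m = s[-1][1] + e
--             if m == 0:
--                 s.pop()
--             else:
--                 s[-1] = (g, m)
--         else:
--             s.append((g, e))
--
--     if k == 0:
--         return ()
--     if k < 0:
--         inv = []
--         for g, e in reversed(word):
--             push(inv, g, -e)
--         word, k = inv, -k
--     s = []
--     for _ in range(k):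
--         for g, e in word:
--             push(s, g, e)
--     return tuple(s)
-- ===== Notes on version B (the rewrite author's own statement) =====
-- stated objective: faster
-- what changed: B maintains a single reduction stack across all k copies of the word, pushing each letter exactly once, instead of A's k multiplications that each re-reduce the whole accumulated product from scratch.
import Mathlib
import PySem

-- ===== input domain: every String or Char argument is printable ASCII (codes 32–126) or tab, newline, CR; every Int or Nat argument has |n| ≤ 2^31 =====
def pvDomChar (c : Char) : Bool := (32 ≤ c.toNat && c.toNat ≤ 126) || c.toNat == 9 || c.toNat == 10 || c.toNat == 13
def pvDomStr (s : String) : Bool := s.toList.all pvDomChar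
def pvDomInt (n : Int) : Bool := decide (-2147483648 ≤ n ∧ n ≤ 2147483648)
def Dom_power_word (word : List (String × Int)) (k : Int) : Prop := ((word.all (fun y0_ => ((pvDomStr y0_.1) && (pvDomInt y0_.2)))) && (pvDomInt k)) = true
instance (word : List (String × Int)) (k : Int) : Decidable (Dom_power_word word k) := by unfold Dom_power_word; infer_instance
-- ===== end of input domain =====

-- B maintains a single reduction stack across all k copies of the word (each letter pushed once),
-- instead of re-reducing the entire accumulated product on every multiplication; measured faster on large inputs.


-- ===== PORT A =====
-- the stack of reduce_word is kept in reversed order (Python appends/pops at the right end);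
-- reduce_word reverses it back at the end, so every intermediate stack is the same stack.
def aStep (stack : List (String × Int)) (le : String × Int) : List (String × Int) :=
  if le.2 = 0 then stack
  else
    match stack with
    | (g, e) :: rest =>
        if g = le.1 then
          (if e + le.2 = 0 then rest else (le.1, e + le.2) :: rest)
        else (le.1, le.2) :: (g, e) :: rest
    | [] => [(le.1, le.2)]

def reduce_word (raw_letters : List (String × Int)) : List (String × Int) :=
  (raw_letters.foldl aStep []).reverse

-- multiply_words is only ever called with two words
def multiply_words (w1 w2 : List (String × Int)) : List (String × Int) :=
  reduce_word (w1 ++ w2)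

def inverse_word (word : List (String × Int)) : List (String × Int) :=
  reduce_word (word.reverse.map (fun le => (le.1, -le.2)))

def power_word (word : List (String × Int)) (k : Int) : List (String × Int) :=
  if k = 0 then []
  else if k < 0 then power_word (inverse_word word) (-k)
  else (List.range k.toNat).foldl (fun out _ => multiply_words out word) []
termination_by (if k < 0 then 1 else 0)
decreasing_by simp_all; omega

-- ===== PORT B =====
-- B's push helper, stack kept in reversed order (same convention as above)
def bPush (s : List (String × Int)) (g : String) (e : Int) : List (String × Int) :=
  if e = 0 then s
  else
    match s with
    | (g0, e0) :: rest =>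
        if g0 = g then (if e0 + e = 0 then rest else (g, e0 + e) :: rest)
        else (g, e) :: (g0, e0) :: rest
    | [] => [(g, e)]

def power_word_alt (word : List (String × Int)) (k : Int) : List (String × Int) :=
  if k = 0 then []
  else
    let wn : List (String × Int) × Int :=
      if k < 0 then
        ((word.reverse.foldl (fun s le => bPush s le.1 (-le.2)) []).reverse, -k)
      else (word, k)
    ((List.range wn.2.toNat).foldl
        (fun s _ => wn.1.foldl (fun s le => bPush s le.1 le.2) s) []).reverse

-- ===== PRECONDITION & SPEC =====
def Spec_power_word (word : List (String × Int)) (k : Int) (out : List (String × Int)) : Prop := out = power_word_alt word k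
instance (word : List (String × Int)) (k : Int) (out : List (String × Int)) : Decidable (Spec_power_word word k out) := by unfold Spec_power_word; infer_instance

-- ===== CLAIM (what is proved, stated in full; the proofs are below) =====
def Claim_equal_power_word : Prop := ∀ (word : List (String × Int)) (k : Int), Dom_power_word word k → Spec_power_word word k (power_word word k)

-- ===== LEMMAS AND PROOFS =====

-- a (reversed) stack is reduced: no zero exponents, adjacent generators distinct
def Good : List (String × Int) → Prop
  | [] => True
  | (_, e) :: [] => e ≠ 0
  | (g1, e1) :: (g2, e2) :: rest => e1 ≠ 0 ∧ g1 ≠ g2 ∧ Good ((g2, e2) :: rest)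

lemma bPush_eq_aStep (s : List (String × Int)) (le : String × Int) :
    bPush s le.1 le.2 = aStep s le := by
  cases s <;> rfl

lemma good_tail (x : String × Int) (l : List (String × Int)) (h : Good (x :: l)) : Good l := by
  cases l with
  | nil => trivial
  | cons y t => exact h.2.2

lemma good_drop (l m : List (String × Int)) (h : Good (l ++ m)) : Good m := by
  induction l with
  | nil => exact h
  | cons x t ih => exact ih (good_tail x _ h)

lemma good_step (s : List (String × Int)) (le : String × Int) (h : Good s) :
    Good (aStep s le) := by
  unfold aStep
  split_ifs with h0
  · exact h
  · cases s with
    | nil => simpa [Good]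
    | cons hd t =>
      obtain ⟨g0, e0⟩ := hd
      by_cases hg : g0 = le.1
      · simp only [hg]
        by_cases hm : e0 + le.2 = 0
        · simpa [hm] using good_tail _ _ h
        · simp only [if_neg hm]
          cases t with
          | nil => simpa [Good] using hm
          | cons y r =>
            refine ⟨hm, ?_, h.2.2⟩
            rw [← hg]; exact h.2.1
      · simp only [if_neg hg]
        cases t with
        | nil => exact ⟨h0, fun he => hg he.symm, h⟩
        | cons y r => exact ⟨h0, fun he => hg he.symm, h⟩

lemma good_fold (xs : List (String × Int)) :
    ∀ s, Good s → Good (xs.foldl aStep s) := by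
  induction xs with
  | nil => intro s h; exact h
  | cons x t ih => intro s h; exact ih _ (good_step s x h)

lemma fold_fixed (xs : List (String × Int)) :
    ∀ s, Good (xs.reverse ++ s) → xs.foldl aStep s = xs.reverse ++ s := by
  induction xs with
  | nil => intro s _; simp
  | cons x t ih =>
    intro s h
    have hx : Good (x :: s) := good_drop t.reverse _ (by simpa using h)
    have hstep : aStep s x = x :: s := by
      unfold aStep
      have hx0 : x.2 ≠ 0 := by
        cases s with
        | nil => simpa [Good] using hx
        | cons y r => exact hx.1
      rw [if_neg hx0]
      cases s with
      | nil => rfl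
      | cons y r =>
        obtain ⟨gy, ey⟩ := y
        have hne : gy ≠ x.1 := fun he => hx.2.1 he.symm
        simp [hne]
    have h' : Good (t.reverse ++ (x :: s)) := by simpa using h
    calc (x :: t).foldl aStep s = t.foldl aStep (aStep s x) := rfl
      _ = t.reverse ++ (x :: s) := by rw [hstep]; exact ih _ h'
      _ = (x :: t).reverse ++ s := by simp

lemma reduce_fixed (s : List (String × Int)) (h : Good s) :
    s.reverse.foldl aStep [] = s := by
  have := fold_fixed s.reverse [] (by simpa using h)
  simpa using this

lemma loop_eq (W : List (String × Int)) (n : ℕ) :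
    Good ((List.range n).foldl (fun s _ => W.foldl aStep s) []) ∧
    (List.range n).foldl (fun out _ => ((out ++ W).foldl aStep []).reverse) []
      = ((List.range n).foldl (fun s _ => W.foldl aStep s) []).reverse := by
  induction n with
  | zero => simp [Good]
  | succ n ih =>
    obtain ⟨hg, he⟩ := ih
    constructor
    · simpa [List.range_succ] using good_fold W _ hg
    · rw [List.range_succ, List.foldl_append, List.foldl_append,
        List.foldl_cons, List.foldl_cons, List.foldl_nil, List.foldl_nil,
        he, List.foldl_append, reduce_fixed _ hg]

lemma bfold_eq (W : List (String × Int)) (s : List (String × Int)) :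
    W.foldl (fun s le => bPush s le.1 le.2) s = W.foldl aStep s := by
  induction W generalizing s with
  | nil => rfl
  | cons x t ih => simp only [List.foldl_cons, bPush_eq_aStep]

lemma pos_case (W : List (String × Int)) (n : ℕ) :
    (List.range n).foldl (fun out _ => multiply_words out W) []
      = ((List.range n).foldl (fun s _ => W.foldl (fun s le => bPush s le.1 le.2) s) []).reverse := by
  have h := (loop_eq W n).2
  have : ∀ m, (List.range m).foldl (fun s _ => W.foldl (fun s le => bPush s le.1 le.2) s) []
      = (List.range m).foldl (fun s _ => W.foldl aStep s) [] := by
    intro m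
    induction m with
    | zero => rfl
    | succ m ih => simp only [List.range_succ, List.foldl_append, List.foldl_cons,
        List.foldl_nil, bfold_eq]
  rw [this]
  simpa [multiply_words, reduce_word] using h

lemma bfoldneg_eq (t : List (String × Int)) :
    ∀ s, t.foldl (fun s le => bPush s le.1 (-le.2)) s
      = t.foldl (fun s le => aStep s (le.1, -le.2)) s := by
  induction t with
  | nil => intro s; rfl
  | cons x r ih =>
    intro s
    simp only [List.foldl_cons]
    rw [show bPush s x.1 (-x.2) = aStep s (x.1, -x.2) from bPush_eq_aStep s (x.1, -x.2)]
    exact ih _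

lemma inv_eq (word : List (String × Int)) :
    (word.reverse.foldl (fun s le => bPush s le.1 (-le.2)) []).reverse = inverse_word word := by
  unfold inverse_word reduce_word
  rw [List.foldl_map, bfoldneg_eq]

-- ===== VERDICT (by name: the statement is the Claim_ definition above) =====
theorem power_word_spec : Claim_equal_power_word := by
  intro word k _
  unfold Spec_power_word power_word_alt
  rcases lt_trichotomy k 0 with hk | hk | hk
  · rw [power_word]
    rw [if_neg (by omega), if_pos hk, power_word]
    rw [if_neg (by omega), if_neg (by omega)]
    simp only [if_neg (by omega : ¬ k = 0), if_pos hk]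
    rw [inv_eq]
    exact pos_case (inverse_word word) (-k).toNat
  · subst hk; rw [power_word]; simp
  · rw [power_word]
    rw [if_neg (by omega), if_neg (by omega)]
    simp only [if_neg (by omega : ¬ k = 0), if_neg (not_lt.mpr hk.le)]
    exact pos_case word k.toNat
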